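-- pv_equiv track=rewrite | github.com/cin4ed/CoolPath | coolpath.py | listOfPaths
-- ===== SOURCE A (Python) =====
-- def listOfPaths(PATH):
--
-- 	listOfPaths = list(PATH) # Convert the String PATH to a list PATH
--
-- 	newList = [[]] # Inside this list will be the paths.
--
--
-- 	# Sincerly I don't even know how I made the following, so I hope you understand me in my next comments sorry.
--
-- 	# This for is to divide the paths inside the listOfPaths into another lists inside this
-- 	counterA = 0
-- 	for letter in listOfPaths:
-- 		# Accordingly to the ":" found, will increase the counter by 1 making separate lists
-- 		if letter != ':':
-- 			newList[counterA].append(letter)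
-- 		else:
-- 			newList.append([])
-- 			counterA += 1
--
-- 	# This for convert the lists inside listOfPaths into strings
-- 	counterB = 0
-- 	for lista in newList: # Yes, lista means list in spanish, list is a reserved keyword so i don't want problems :P
-- 		newList[counterB] = ''.join(lista)
-- 		counterB += 1
--
-- 	return newList
-- ===== SOURCE B (Python) =====
-- def listOfPaths(PATH):
--     return PATH.split(':')
-- ===== Notes on version B (the rewrite author's own statement) =====
-- stated objective: simpler
-- what changed: Replaced the manual two-loop char-accumulation split (append chars to the last bucket, then join each bucket) with a single call to str.split.
import Mathlib
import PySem

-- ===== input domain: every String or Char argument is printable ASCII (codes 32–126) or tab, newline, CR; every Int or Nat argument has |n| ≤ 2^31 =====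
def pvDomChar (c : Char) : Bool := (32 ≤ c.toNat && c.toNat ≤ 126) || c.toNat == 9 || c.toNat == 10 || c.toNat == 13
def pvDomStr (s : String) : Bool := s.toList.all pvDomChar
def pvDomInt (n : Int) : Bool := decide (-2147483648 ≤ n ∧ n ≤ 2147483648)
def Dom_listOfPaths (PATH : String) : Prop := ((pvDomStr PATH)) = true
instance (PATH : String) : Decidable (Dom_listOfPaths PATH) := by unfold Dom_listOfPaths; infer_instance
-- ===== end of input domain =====

-- B replaces A's manual two-loop character accumulation with a single str.split(':'); objective: simpler.

-- ===== PORT A =====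
-- newList[counterA].append(letter): counterA is always newList's last index, so this appends to the last bucket
def pvAppendLast (nl : List (List Char)) (c : Char) : List (List Char) :=
  match nl with
  | [] => []
  | [l] => [l ++ [c]]
  | l :: rest => l :: pvAppendLast rest c

def listOfPaths (PATH : String) : List String :=
  let listOfPaths := PATH.toList                 -- list(PATH)
  let newList : List (List Char) := [[]]         -- [[]]
  -- first for-loop: distribute letters into buckets, new bucket at each ':'
  let newList := listOfPaths.foldl (fun nl letter =>
    if letter ≠ ':' then pvAppendLast nl letter
    else nl ++ [[]]) newList
  -- second for-loop: join each bucket into a string, in place (index counterB = position)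
  newList.map (fun lista => String.ofList lista)

-- ===== PORT B =====
def listOfPaths_alt (PATH : String) : List String :=
  (PySem.Str.split? PATH ":").getD []            -- PATH.split(':'); sep is nonempty so split? is always some

-- ===== PRECONDITION & SPEC =====
def Spec_listOfPaths (PATH : String) (out : List String) : Prop := out = listOfPaths_alt PATH
instance (PATH : String) (out : List String) : Decidable (Spec_listOfPaths PATH out) := by unfold Spec_listOfPaths; infer_instance

-- ===== CLAIM (what is proved, stated in full; the proofs are below) =====
def Claim_equal_listOfPaths : Prop := ∀ (PATH : String), Dom_listOfPaths PATH → Spec_listOfPaths PATH (listOfPaths PATH)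

-- ===== LEMMAS AND PROOFS =====

-- simple recursive characterisation of splitting on ':'
def pvConsHead (c : Char) (gs : List (List Char)) : List (List Char) :=
  match gs with
  | [] => [[c]]
  | g :: gs => (c :: g) :: gs

def pvSplit : List Char → List (List Char)
  | [] => [[]]
  | c :: rest => if c = ':' then [] :: pvSplit rest else pvConsHead c (pvSplit rest)

def pvHeadApp (p : List Char) (gs : List (List Char)) : List (List Char) :=
  match gs with
  | [] => [p]
  | g :: gs => (p ++ g) :: gs

theorem pvSplit_ne_nil (l : List Char) : pvSplit l ≠ [] := by
  cases l with
  | nil => simp [pvSplit]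
  | cons c rest =>
    simp only [pvSplit]
    split
    · simp
    · cases h : pvSplit rest <;> simp [pvConsHead]

theorem pvHeadApp_nil (gs : List (List Char)) (h : gs ≠ []) : pvHeadApp [] gs = gs := by
  cases gs with
  | nil => exact absurd rfl h
  | cons g gs => simp [pvHeadApp]

theorem pvHeadApp_snoc (p : List Char) (c : Char) (gs : List (List Char)) :
    pvHeadApp (p ++ [c]) gs = pvHeadApp p (pvConsHead c gs) := by
  cases gs <;> simp [pvHeadApp, pvConsHead]

theorem pvAppendLast_snoc (prev : List (List Char)) (cur : List Char) (c : Char) :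
    pvAppendLast (prev ++ [cur]) c = prev ++ [cur ++ [c]] := by
  induction prev with
  | nil => simp [pvAppendLast]
  | cons l rest ih =>
    cases rest with
    | nil => simp [pvAppendLast]
    | cons l' rest' => simpa [pvAppendLast] using ih

-- the A-side loop invariant
theorem foldl_split (chars : List Char) (prev : List (List Char)) (cur : List Char) :
    chars.foldl (fun nl letter =>
      if letter ≠ ':' then pvAppendLast nl letter else nl ++ [[]]) (prev ++ [cur])
    = prev ++ pvHeadApp cur (pvSplit chars) := by
  induction chars generalizing prev cur with
  | nil => simp [pvHeadApp, pvSplit]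
  | cons c rest ih =>
    by_cases hc : c = ':'
    · subst hc
      rw [List.foldl_cons, if_neg (by decide)]
      rw [show (prev ++ [cur]) ++ [[]] = (prev ++ [cur]) ++ [([] : List Char)] from rfl,
          ih (prev ++ [cur]) [], pvHeadApp_nil _ (pvSplit_ne_nil rest)]
      simp [pvSplit, pvHeadApp]
    · simp only [List.foldl_cons, if_pos (by simpa using hc)]
      rw [pvAppendLast_snoc, ih prev (cur ++ [c]), pvHeadApp_snoc]
      simp [pvSplit, hc]

-- the B-side: splitOn.go with separator ":" computes pvSplit
theorem go_split (l : List Char) (fuel : Nat) (cur : List Char) (acc : List (List Char))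
    (h : l.length ≤ fuel) :
    PySem.Chars.splitOn.go [':'] fuel l cur acc
    = acc.reverse ++ pvHeadApp cur.reverse (pvSplit l) := by
  induction l generalizing fuel cur acc with
  | nil =>
    cases fuel <;> simp [PySem.Chars.splitOn.go, pvSplit, pvHeadApp]
  | cons c rest ih =>
    cases fuel with
    | zero => simp at h
    | succ fuel =>
      simp only [PySem.Chars.splitOn.go]
      by_cases hc : c = ':'
      · subst hc
        rw [if_pos (by simp [List.isPrefixOf])]
        rw [show List.drop [':'].length (':' :: rest) = rest from rfl]
        rw [ih fuel [] _ (by simpa using Nat.le_of_succ_le_succ h)]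
        simp only [List.reverse_nil, pvHeadApp_nil _ (pvSplit_ne_nil rest)]
        simp [pvSplit, pvHeadApp]
      · rw [if_neg (by simp [List.isPrefixOf]; exact fun hh => hc hh.symm)]
        rw [ih fuel (c :: cur) acc (by simpa using Nat.le_of_succ_le_succ h)]
        simp [pvSplit, hc, pvHeadApp_snoc]

theorem splitOn_eq_pvSplit (l : List Char) :
    PySem.Chars.splitOn l [':'] = pvSplit l := by
  unfold PySem.Chars.splitOn
  rw [go_split l (l.length + 1) [] [] (Nat.le_succ _)]
  simp [pvHeadApp_nil _ (pvSplit_ne_nil l)]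

-- ===== VERDICT (by name: the statement is the Claim_ definition above) =====
theorem listOfPaths_spec : Claim_equal_listOfPaths := by
  intro PATH _
  unfold Spec_listOfPaths listOfPaths listOfPaths_alt
  rw [show PySem.Str.split? PATH ":"
        = (PySem.Chars.split? PATH.toList ":".toList).map (List.map String.ofList) from rfl]
  rw [show (":".toList : List Char) = [':'] from rfl]
  rw [show PySem.Chars.split? PATH.toList [':']
        = some (PySem.Chars.splitOn PATH.toList [':']) from by
      simp [PySem.Chars.split?]]
  rw [splitOn_eq_pvSplit]
  have h := foldl_split PATH.toList [] []
  rw [pvHeadApp_nil _ (pvSplit_ne_nil _)] at h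
  exact congrArg (List.map (fun lista => String.ofList lista)) h
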